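-- pv_equiv track=rewrite | github.com/RDelg/adventofcode | 2024/04.py | paths_from_point
-- ===== SOURCE A (Python) =====
-- from typing import Generator
--
-- def paths_from_point(x: int, y: int, n: int, m: int, length: int) -> Generator[list[tuple[int, int]], None, None]:
--     # to the right
--     yield [(x, y + i) for i in range(min(m - y, length))]
--     # to the left
--     yield [(x, y - i) for i in range(min(y + 1, length))]
--     # to the bottom
--     yield [(x + i, y) for i in range(min(n - x, length))]
--     # to the top
--     yield [(x - i, y) for i in range(min(x + 1, length))]
--     # to the bottom right
--     yield [(x + i, y + i) for i in range(min(n - x, m - y, length))]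
--     # to the bottom left
--     yield [(x + i, y - i) for i in range(min(n - x, y + 1, length))]
--     # to the top right
--     yield [(x - i, y + i) for i in range(min(x + 1, m - y, length))]
--     # to the top left
--     yield [(x - i, y - i) for i in range(min(x + 1, y + 1, length))]
-- ===== SOURCE B (Python) =====
-- def paths_from_point(x: int, y: int, n: int, m: int, length: int):
--     # Walk each ray cell by cell with a per-step boundary test, instead of
--     # precomputing the step count with min() and indexing with range().
--     def ok(dx, dy, cx, cy):
--         # the only constraints a direction is subject to are on the axes it moves along
--         if dx > 0 and cx >= n:
--             return False
--         if dx < 0 and cx < 0: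
--             return False
--         if dy > 0 and cy >= m:
--             return False
--         if dy < 0 and cy < 0:
--             return False
--         return True
--
--     def ray(dx, dy):
--         path = []
--         cx, cy = x, y
--         while len(path) < length and ok(dx, dy, cx, cy):
--             path.append((cx, cy))
--             cx += dx
--             cy += dy
--         return path
--
--     for dx, dy in ((0, 1), (0, -1), (1, 0), (-1, 0), (1, 1), (1, -1), (-1, 1), (-1, -1)):
--         yield ray(dx, dy)
-- ===== Notes on version B (the rewrite author's own statement) =====
-- stated objective: alternative
-- what changed: B walks each of the 8 rays incrementally, keeping the current coordinate as loop state and stopping at a per-step boundary test, instead of A's closed-form min() step counts indexed by range() comprehensions.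
import Mathlib
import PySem

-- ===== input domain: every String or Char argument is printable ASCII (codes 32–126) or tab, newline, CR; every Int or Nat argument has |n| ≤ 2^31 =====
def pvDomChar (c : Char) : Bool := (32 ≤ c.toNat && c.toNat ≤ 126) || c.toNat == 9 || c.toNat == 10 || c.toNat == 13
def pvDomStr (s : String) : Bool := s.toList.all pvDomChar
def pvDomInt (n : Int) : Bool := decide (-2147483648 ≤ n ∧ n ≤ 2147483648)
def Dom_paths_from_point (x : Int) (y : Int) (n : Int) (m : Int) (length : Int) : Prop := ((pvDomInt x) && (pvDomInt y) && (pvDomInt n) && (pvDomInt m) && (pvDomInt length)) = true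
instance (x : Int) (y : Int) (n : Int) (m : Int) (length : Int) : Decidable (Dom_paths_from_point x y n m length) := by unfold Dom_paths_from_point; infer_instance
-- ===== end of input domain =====

-- B walks each of the 8 rays cell by cell with a per-step boundary test (coordinate kept as loop
-- state), instead of A's closed-form min() step counts; alternative decomposition, same cost.


-- ===== PORT A =====
def paths_from_point (x : Int) (y : Int) (n : Int) (m : Int) (length : Int) : List (List (Int × Int)) :=
  [ (PySem.List.pyRange 0 (min (m - y) length) 1).map (fun i => (x, y + i)),
    (PySem.List.pyRange 0 (min (y + 1) length) 1).map (fun i => (x, y - i)),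
    (PySem.List.pyRange 0 (min (n - x) length) 1).map (fun i => (x + i, y)),
    (PySem.List.pyRange 0 (min (x + 1) length) 1).map (fun i => (x - i, y)),
    (PySem.List.pyRange 0 (min (min (n - x) (m - y)) length) 1).map (fun i => (x + i, y + i)),
    (PySem.List.pyRange 0 (min (min (n - x) (y + 1)) length) 1).map (fun i => (x + i, y - i)),
    (PySem.List.pyRange 0 (min (min (x + 1) (m - y)) length) 1).map (fun i => (x - i, y + i)),
    (PySem.List.pyRange 0 (min (min (x + 1) (y + 1)) length) 1).map (fun i => (x - i, y - i)) ]

-- ===== PORT B =====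
-- B-side helpers: the per-step boundary test and the fuel-bounded walker (while-loop of Source B;
-- fuel = length.toNat mirrors 'len(path) < length', exact also for length ≤ 0)
def pvOk (n m dx dy cx cy : Int) : Bool :=
  if dx > 0 ∧ cx ≥ n then false
  else if dx < 0 ∧ cx < 0 then false
  else if dy > 0 ∧ cy ≥ m then false
  else if dy < 0 ∧ cy < 0 then false
  else true

def pvRay (n m dx dy : Int) : Nat → Int → Int → List (Int × Int)
  | 0, _, _ => []
  | fuel + 1, cx, cy =>
    if pvOk n m dx dy cx cy then (cx, cy) :: pvRay n m dx dy fuel (cx + dx) (cy + dy) else []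

def paths_from_point_alt (x : Int) (y : Int) (n : Int) (m : Int) (length : Int) : List (List (Int × Int)) :=
  [((0:Int), (1:Int)), (0, -1), (1, 0), (-1, 0), (1, 1), (1, -1), (-1, 1), (-1, -1)].map
    (fun d => pvRay n m d.1 d.2 length.toNat x y)

-- ===== PRECONDITION & SPEC =====
def Spec_paths_from_point (x : Int) (y : Int) (n : Int) (m : Int) (length : Int) (out : List (List (Int × Int))) : Prop := out = paths_from_point_alt x y n m length
instance (x : Int) (y : Int) (n : Int) (m : Int) (length : Int) (out : List (List (Int × Int))) : Decidable (Spec_paths_from_point x y n m length out) := by unfold Spec_paths_from_point; infer_instance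

-- ===== CLAIM (what is proved, stated in full; the proofs are below) =====
def Claim_equal_paths_from_point : Prop := ∀ (x : Int) (y : Int) (n : Int) (m : Int) (length : Int), Dom_paths_from_point x y n m length → Spec_paths_from_point x y n m length (paths_from_point x y n m length)

-- ===== LEMMAS AND PROOFS =====

/-- The walker equals a range-map once a bound `b` characterises the step test along the ray. -/
theorem pvRay_eq (n m dx dy : Int) (fuel : Nat) (x y b : Int)
    (hb : ∀ i : Int, 0 ≤ i → (pvOk n m dx dy (x + i * dx) (y + i * dy) = true ↔ i < b)) :
    pvRay n m dx dy fuel x y =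
      (List.range (min b (fuel : Int)).toNat).map
        (fun i : Nat => (x + (i : Int) * dx, y + (i : Int) * dy)) := by
  induction fuel generalizing x y b with
  | zero => simp [pvRay]
  | succ k ih =>
    have h0 := hb 0 le_rfl
    simp only [zero_mul, add_zero] at h0
    by_cases hc : pvOk n m dx dy x y = true
    · have hbpos : 0 < b := h0.mp hc
      have hb' : ∀ i : Int, 0 ≤ i →
          (pvOk n m dx dy (x + dx + i * dx) (y + dy + i * dy) = true ↔ i < b - 1) := by
        intro i hi
        have h := hb (i + 1) (by omega)
        rw [show x + (i + 1) * dx = x + dx + i * dx by ring,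
          show y + (i + 1) * dy = y + dy + i * dy by ring] at h
        rw [h]
        omega
      have hrec := ih (x + dx) (y + dy) (b - 1) hb'
      rw [pvRay, if_pos hc, hrec]
      have hcast : (((k + 1 : Nat)) : Int) = (k : Int) + 1 := by push_cast; ring
      have hcount : (min b ((k : Int) + 1)).toNat = (min (b - 1) (k : Int)).toNat + 1 := by omega
      rw [hcast, hcount, List.range_succ_eq_map, List.map_cons, List.map_map]
      refine congrArg₂ List.cons (by norm_num) (List.map_congr_left fun i _ => ?_)
      simp only [Function.comp_apply, Nat.succ_eq_add_one, Prod.mk.injEq]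
      push_cast
      constructor <;> ring
    · have hble : b ≤ 0 := by by_contra h; exact hc (h0.mpr (by omega))
      rw [pvRay, if_neg hc]
      have : (min b ((k:Int)+1)).toNat = 0 := by omega
      push_cast
      rw [this]
      simp

/-- One ray of A (a clipped `range` comprehension) equals the walker, given the bound. -/
theorem ray_side (n m dx dy : Int) (x y b length : Int) (f : Int → Int × Int)
    (hb : ∀ i : Int, 0 ≤ i → (pvOk n m dx dy (x + i * dx) (y + i * dy) = true ↔ i < b))
    (hf : ∀ i : Int, f i = (x + i * dx, y + i * dy)) :
    (PySem.List.pyRange 0 (min b length) 1).map f = pvRay n m dx dy length.toNat x y := by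
  rw [pvRay_eq n m dx dy length.toNat x y b hb, PySem.List.pyRange_one, List.map_map]
  have hcnt : (min b length - 0).toNat = (min b ((length.toNat : Int))).toNat := by omega
  rw [hcnt]
  apply List.map_congr_left
  intro i _
  simp [Function.comp, hf]

-- ===== VERDICT (by name: the statement is the Claim_ definition above) =====
theorem paths_from_point_spec : Claim_equal_paths_from_point := by
  intro x y n m length _
  unfold Spec_paths_from_point paths_from_point paths_from_point_alt
  simp only [List.map]
  refine congrArg₂ List.cons ?_ (congrArg₂ List.cons ?_ (congrArg₂ List.cons ?_
    (congrArg₂ List.cons ?_ (congrArg₂ List.cons ?_ (congrArg₂ List.cons ?_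
    (congrArg₂ List.cons ?_ (congrArg₂ List.cons ?_ rfl))))))) <;>
  [ exact ray_side n m 0 1 x y (m - y) length _
      (fun i hi => by simp only [pvOk]; split_ifs <;> simp_all <;> try omega)
      (fun i => by simp only [Prod.mk.injEq]; constructor <;> ring);
    exact ray_side n m 0 (-1) x y (y + 1) length _
      (fun i hi => by simp only [pvOk]; split_ifs <;> simp_all <;> try omega)
      (fun i => by simp only [Prod.mk.injEq]; constructor <;> ring);
    exact ray_side n m 1 0 x y (n - x) length _
      (fun i hi => by simp only [pvOk]; split_ifs <;> simp_all <;> try omega)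
      (fun i => by simp only [Prod.mk.injEq]; constructor <;> ring);
    exact ray_side n m (-1) 0 x y (x + 1) length _
      (fun i hi => by simp only [pvOk]; split_ifs <;> simp_all <;> try omega)
      (fun i => by simp only [Prod.mk.injEq]; constructor <;> ring);
    exact ray_side n m 1 1 x y (min (n - x) (m - y)) length _
      (fun i hi => by simp only [pvOk]; split_ifs <;> simp_all <;> try omega)
      (fun i => by simp only [Prod.mk.injEq]; constructor <;> ring);
    exact ray_side n m 1 (-1) x y (min (n - x) (y + 1)) length _
      (fun i hi => by simp only [pvOk]; split_ifs <;> simp_all <;> try omega)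
      (fun i => by simp only [Prod.mk.injEq]; constructor <;> ring);
    exact ray_side n m (-1) 1 x y (min (x + 1) (m - y)) length _
      (fun i hi => by simp only [pvOk]; split_ifs <;> simp_all <;> try omega)
      (fun i => by simp only [Prod.mk.injEq]; constructor <;> ring);
    exact ray_side n m (-1) (-1) x y (min (x + 1) (y + 1)) length _
      (fun i hi => by simp only [pvOk]; split_ifs <;> simp_all <;> try omega)
      (fun i => by simp only [Prod.mk.injEq]; constructor <;> ring) ]
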